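-- pv_equiv track=rewrite | github.com/Skyvern-AI/skyvern | tests/unit/skill_test_helpers.py | first_nonempty_line_after_h1
-- ===== SOURCE A (Python) =====
-- def first_nonempty_line_after_h1(text: str) -> str:
--     """Return the first non-empty line after the top-level ``# heading`` in *text*."""
--     after_h1 = False
--     for raw_line in text.splitlines():
--         line = raw_line.strip()
--         if raw_line.startswith("# "):
--             after_h1 = True
--             continue
--         if not after_h1 or not line:
--             continue
--         return line
--     return ""
-- ===== SOURCE B (Python) =====
-- def first_nonempty_line_after_h1(text: str) -> str:
--     """Return the first non-empty line after the top-level ``# heading`` in *text*."""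
--     lines = text.splitlines()
--     flags = [False]
--     for l in lines:
--         flags.append(flags[-1] or l.startswith("# "))
--     cands = [l.strip() for seen, l in zip(flags, lines)
--              if seen and not l.startswith("# ") and l.strip()]
--     return cands[0] if cands else ""
-- ===== Notes on version B (the rewrite author's own statement) =====
-- stated objective: alternative
-- what changed: Replaces A's single stateful early-return loop with a data-flow pipeline: materialize a cumulative boolean prefix array marking whether a heading has already occurred, zip it with the lines, filter-map to the list of all stripped candidate lines, and take its head.
import Mathlib
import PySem

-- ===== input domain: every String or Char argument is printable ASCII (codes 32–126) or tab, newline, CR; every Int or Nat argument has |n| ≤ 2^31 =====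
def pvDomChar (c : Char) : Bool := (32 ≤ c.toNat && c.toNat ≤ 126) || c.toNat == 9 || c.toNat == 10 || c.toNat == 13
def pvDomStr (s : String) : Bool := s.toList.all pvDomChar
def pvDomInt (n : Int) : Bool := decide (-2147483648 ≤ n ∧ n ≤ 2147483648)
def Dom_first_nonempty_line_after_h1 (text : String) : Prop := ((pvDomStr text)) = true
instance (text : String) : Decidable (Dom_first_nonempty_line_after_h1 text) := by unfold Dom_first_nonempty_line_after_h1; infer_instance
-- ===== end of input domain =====

-- B replaces A's stateful early-return loop by a data-flow pipeline: a cumulative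
-- 'heading seen' prefix-flag array, zipped with the lines, filtered to the list of
-- all candidates, whose head is the answer (objective: alternative).


-- ===== PORT A =====
-- A's loop over splitlines with the after_h1 flag, transcribed as structural recursion.
def fnlLoopA : List String → Bool → String
  | [], _ => ""
  | raw :: rest, after_h1 =>
    let line := PySem.Str.strip raw
    if PySem.Str.startswith raw "# " = true then fnlLoopA rest true
    else if after_h1 = false ∨ line = "" then fnlLoopA rest after_h1
    else line

def first_nonempty_line_after_h1 (text : String) : String :=
  fnlLoopA (PySem.Str.splitlines text) false

-- ===== PORT B =====
-- Source B's flags loop: start from [False], append flags[-1] or l.startswith('# ') for each line.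
def fnlFlags (ls : List String) : List Bool :=
  ls.foldl (fun fs l => fs ++ [fs.getLast! || PySem.Str.startswith l "# "]) [false]

def first_nonempty_line_after_h1_alt (text : String) : String :=
  let lines := PySem.Str.splitlines text
  let flags := fnlFlags lines
  let cands := (flags.zip lines).filterMap (fun p =>
    if p.1 && !(PySem.Str.startswith p.2 "# ") && !(PySem.Str.strip p.2 == "")
    then some (PySem.Str.strip p.2) else none)
  cands.headD ""

-- ===== PRECONDITION & SPEC =====
def Spec_first_nonempty_line_after_h1 (text : String) (out : String) : Prop := out = first_nonempty_line_after_h1_alt text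
instance (text : String) (out : String) : Decidable (Spec_first_nonempty_line_after_h1 text out) := by unfold Spec_first_nonempty_line_after_h1; infer_instance

-- ===== CLAIM (what is proved, stated in full; the proofs are below) =====
def Claim_equal_first_nonempty_line_after_h1 : Prop := ∀ (text : String), Dom_first_nonempty_line_after_h1 text → Spec_first_nonempty_line_after_h1 text (first_nonempty_line_after_h1 text)

-- ===== LEMMAS AND PROOFS =====

-- B's append-loop over flags builds exactly a scanl of the cumulative-or function.
theorem fnlFlags_scanl (ls : List String) (b : Bool) (fs : List Bool) :
    ls.foldl (fun fs l => fs ++ [fs.getLast! || PySem.Str.startswith l "# "]) (fs ++ [b])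
      = fs ++ ls.scanl (fun a l => a || PySem.Str.startswith l "# ") b := by
  induction ls generalizing fs b with
  | nil => rfl
  | cons l rest ih =>
    simp only [List.foldl_cons, List.scanl_cons]
    have hlast : (fs ++ [b]).getLast! = b := by
      exact List.getLast!_of_getLast? (by simp)
    rw [hlast, show fs ++ [b] ++ [b || PySem.Str.startswith l "# "]
        = (fs ++ [b]) ++ [b || PySem.Str.startswith l "# "] from by simp, ih]
    simp

theorem fnlFlags_eq (ls : List String) :
    fnlFlags ls = ls.scanl (fun a l => a || PySem.Str.startswith l "# ") false := by
  have h := fnlFlags_scanl ls false []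
  simpa [fnlFlags] using h

-- A's stateful loop equals B's zip-filter pipeline over the scanl flags, for any start flag.
theorem fnlLoopA_pipeline (ls : List String) (b : Bool) :
    fnlLoopA ls b =
      (((ls.scanl (fun a l => a || PySem.Str.startswith l "# ") b).zip ls).filterMap (fun p =>
        if p.1 && !(PySem.Str.startswith p.2 "# ") && !(PySem.Str.strip p.2 == "")
        then some (PySem.Str.strip p.2) else none)).headD "" := by
  induction ls generalizing b with
  | nil => rfl
  | cons raw rest ih =>
    simp only [List.scanl_cons, List.zip_cons_cons, List.filterMap_cons, fnlLoopA]
    cases hsw : PySem.Str.startswith raw "# " with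
    | true =>
      rw [if_pos rfl]
      simp only [Bool.not_true, Bool.and_false, Bool.false_and, Bool.or_true,
        if_neg (Bool.false_ne_true)]
      exact ih true
    | false =>
      rw [if_neg (by simp)]
      by_cases hb : b = true
      · by_cases he : PySem.Str.strip raw = ""
        · have he' : (PySem.Str.strip raw == "") = true := by simpa using he
          rw [if_pos (Or.inr he)]
          simp only [hb, he', Bool.not_false, Bool.not_true, Bool.and_true,
            Bool.and_false, Bool.or_false, if_neg (Bool.false_ne_true)]
          exact ih true
        · have he' : (PySem.Str.strip raw == "") = false := by simpa using he
          rw [if_neg (by simp [hb, he])]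
          simp [hb, he']
      · have hb' : b = false := by simpa using hb
        rw [if_pos (Or.inl hb')]
        simp only [hb', Bool.not_false, Bool.false_and, Bool.or_false,
          if_neg (Bool.false_ne_true)]
        exact ih false

-- ===== VERDICT (by name: the statement is the Claim_ definition above) =====
theorem first_nonempty_line_after_h1_spec : Claim_equal_first_nonempty_line_after_h1 := by
  intro text _
  show fnlLoopA (PySem.Str.splitlines text) false =
    (((fnlFlags (PySem.Str.splitlines text)).zip (PySem.Str.splitlines text)).filterMap (fun p =>
      if p.1 && !(PySem.Str.startswith p.2 "# ") && !(PySem.Str.strip p.2 == "")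
      then some (PySem.Str.strip p.2) else none)).headD ""
  rw [fnlFlags_eq, fnlLoopA_pipeline]
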